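-- pv_equiv track=rewrite | github.com/PythonBen/Metro_project | Ben_lepmetro.py | choice_already_visited
-- ===== SOURCE A (Python) =====
-- def choice_already_visited(list_possible, visited):
--     """ fonction that take a list of possible stations, the list of
--         already visited statio. It returns a sublist of the best candidates
--         based on the least visited criterion, it is an helper function of fonction choice"""
--     occurence = []
--     selected = []
--     for i in range((len(list_possible))):
--         occurence.append(visited.count(list_possible[i]))               # create a list of occurence
--
--     for k in range(len(occurence)):
--         if occurence[k] == min(occurence):
--             selected.append(list_possible[k])                           # return a list of the least visited stations
--     return selected                                                     # visited same number of time, otherwise min(occurence) will gives a list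
-- ===== SOURCE B (Python) =====
-- def choice_already_visited(list_possible, visited):
--     """One pass: pre-count visits in a dict, then scan list_possible once
--     keeping a running minimum and the stations achieving it."""
--     counts = {}
--     for v in visited:
--         counts[v] = counts.get(v, 0) + 1
--     best = None
--     selected = []
--     for s in list_possible:
--         c = counts.get(s, 0)
--         if best is None or c < best:
--             best = c
--             selected = [s]
--         elif c == best:
--             selected.append(s)
--     return selected
-- ===== Notes on version B (the rewrite author's own statement) =====
-- stated objective: faster
-- what changed: Replaces A's two passes (an occurrence list built with repeated visited.count, then a scan that recomputes min(occurence) at every step) by a dict of visit counts built once plus a single running-minimum scan over list_possible.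
import Mathlib
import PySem

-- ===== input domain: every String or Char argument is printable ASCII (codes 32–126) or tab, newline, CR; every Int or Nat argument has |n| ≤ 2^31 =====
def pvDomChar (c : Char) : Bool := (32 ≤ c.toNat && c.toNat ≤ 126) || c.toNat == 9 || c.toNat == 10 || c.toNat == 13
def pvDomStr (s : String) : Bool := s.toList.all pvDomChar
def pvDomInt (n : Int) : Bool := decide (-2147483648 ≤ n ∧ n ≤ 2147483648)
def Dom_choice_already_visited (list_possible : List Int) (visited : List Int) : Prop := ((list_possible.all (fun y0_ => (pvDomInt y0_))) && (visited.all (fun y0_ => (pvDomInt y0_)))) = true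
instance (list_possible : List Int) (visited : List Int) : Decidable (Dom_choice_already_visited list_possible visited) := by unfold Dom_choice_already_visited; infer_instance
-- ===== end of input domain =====

-- B replaces A's repeated visited.count and per-step min(occurence) recomputation by a
-- count dict built once plus a single running-minimum scan (objective: faster).

-- ===== PORT A =====
-- occurence.append(visited.count(list_possible[i])) over range(len(list_possible)),
-- then selected.append(list_possible[k]) where occurence[k] == min(occurence).
-- min(occurence) is only evaluated when the loop body runs, i.e. occurence ≠ [], so the
-- `.getD 0` default of `min?` is never reached.
def choice_already_visited (list_possible : List Int) (visited : List Int) : List Int :=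
  let occurence : List Int :=
    (PySem.List.pyRange 0 (PySem.List.len list_possible) 1).foldl
      (fun acc i => acc ++ [((PySem.List.count visited (PySem.List.pyGetD list_possible i 0) : Int))]) []
  (PySem.List.pyRange 0 (PySem.List.len occurence) 1).foldl
    (fun selected k =>
      if PySem.List.pyGetD occurence k 0 = (PySem.List.min? occurence (fun y => y)).getD 0
      then selected ++ [PySem.List.pyGetD list_possible k 0]
      else selected) []

-- ===== PORT B =====
-- one step of B's scan over list_possible: running minimum `st.1` and its bucket `st.2`
def cavStep (counts : PySem.Dict Int Int) (st : Option Int × List Int) (s : Int) : Option Int × List Int :=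
  let c := counts.getD s 0
  match st.1 with
  | none => (some c, [s])
  | some b =>
    if c < b then (some c, [s])
    else if c = b then (some b, st.2 ++ [s])
    else st

def choice_already_visited_alt (list_possible : List Int) (visited : List Int) : List Int :=
  let counts : PySem.Dict Int Int :=
    visited.foldl (fun d x => d.modify x 0 (· + 1)) PySem.Dict.empty
  (list_possible.foldl (cavStep counts) (none, [])).2

-- ===== PRECONDITION & SPEC =====
def Spec_choice_already_visited (list_possible : List Int) (visited : List Int) (out : List Int) : Prop := out = choice_already_visited_alt list_possible visited
instance (list_possible : List Int) (visited : List Int) (out : List Int) : Decidable (Spec_choice_already_visited list_possible visited out) := by unfold Spec_choice_already_visited; infer_instance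

-- ===== CLAIM (what is proved, stated in full; the proofs are below) =====
def Claim_equal_choice_already_visited : Prop := ∀ (list_possible : List Int) (visited : List Int), Dom_choice_already_visited list_possible visited → Spec_choice_already_visited list_possible visited (choice_already_visited list_possible visited)

-- ===== LEMMAS AND PROOFS =====

-- the visit count of a station, as the Int Python's visited.count(s) is
def cavCnt (visited : List Int) (s : Int) : Int := (PySem.List.count visited s : Int)

-- running minimum of the counts of l starting from b
def cavRunMin (f : Int → Int) (b : Int) (l : List Int) : Int :=
  l.foldl (fun a x => min a (f x)) b

lemma cavRunMin_le_init (f : Int → Int) (b : Int) (l : List Int) :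
    cavRunMin f b l ≤ b := by
  induction l generalizing b with
  | nil => simp [cavRunMin]
  | cons x t ih =>
    have h := ih (min b (f x))
    simp only [cavRunMin, List.foldl_cons] at h ⊢
    exact le_trans h (min_le_left _ _)

lemma cavCounts_getD (visited : List Int) (s : Int) :
    (visited.foldl (fun d x => d.modify x 0 (· + 1)) (PySem.Dict.empty : PySem.Dict Int Int)).getD s 0
      = cavCnt visited s := by
  refine (PySem.Dict.getD_foldl_modify_add_one (κ := Int) visited PySem.Dict.empty s).trans ?_
  simp [PySem.Dict.empty, PySem.Dict.getD, PySem.Dict.get?, cavCnt, PySem.List.count_eq]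

-- characterisation of B's scan once the running minimum is initialised
lemma cavLoop_char (counts : PySem.Dict Int Int) (f : Int → Int)
    (hc : ∀ s, counts.getD s 0 = f s) :
    ∀ (l : List Int) (b : Int) (sel : List Int),
      l.foldl (cavStep counts) (some b, sel)
        = (some (cavRunMin f b l),
           (if b = cavRunMin f b l then sel else [])
             ++ l.filter (fun x => f x = cavRunMin f b l)) := by
  intro l
  induction l with
  | nil => intro b sel; simp [cavRunMin]
  | cons x t ih =>
    intro b sel
    have hM : cavRunMin f b (x :: t) = cavRunMin f (min b (f x)) t := rfl
    simp only [List.foldl_cons, cavStep, hc x]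
    rcases lt_trichotomy (f x) b with hlt | heq | hgt
    · rw [if_pos hlt]
      rw [ih (f x) [x], hM, min_eq_right (le_of_lt hlt)]
      generalize hMdef : cavRunMin f (f x) t = M at *
      have hMle : M ≤ f x := hMdef ▸ cavRunMin_le_init f (f x) t
      have hb : ¬ b = M := by omega
      rw [List.filter_cons]
      by_cases hx : f x = M
      · simp [hx, hb]
      · simp [hx, hb]
    · rw [if_neg (by omega), if_pos heq]
      rw [ih b (sel ++ [x]), hM, heq, min_self, List.filter_cons]
      generalize hMdef : cavRunMin f b t = M at *
      by_cases hb : b = M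
      · simp [heq, hb]
      · have hx : ¬ f x = M := by omega
        simp [hb, hx]
    · rw [if_neg (by omega), if_neg (by omega)]
      rw [ih b sel, hM, min_eq_left (le_of_lt hgt)]
      generalize hMdef : cavRunMin f b t = M at *
      have hMle : M ≤ b := hMdef ▸ cavRunMin_le_init f b t
      have hx : ¬ f x = M := by omega
      rw [List.filter_cons]
      simp [hx]

-- B's result is the filter of list_possible by the global minimum count
lemma cavAlt_eq_filter (x : Int) (t : List Int) (visited : List Int) :
    choice_already_visited_alt (x :: t) visited
      = (x :: t).filter
          (fun s => cavCnt visited s = cavRunMin (cavCnt visited) (cavCnt visited x) t) := by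
  unfold choice_already_visited_alt
  simp only [List.foldl_cons]
  rw [show cavStep _ (none, []) x = (some (cavCnt visited x), [x]) by
        simp [cavStep, cavCounts_getD]]
  rw [cavLoop_char _ (cavCnt visited) (cavCounts_getD visited) t (cavCnt visited x) [x]]
  rw [List.filter_cons]
  generalize hMdef : cavRunMin (cavCnt visited) (cavCnt visited x) t = M
  by_cases hx : cavCnt visited x = M
  · simp [hx]
  · simp [hx]

-- occurence = list_possible.map (visited.count ·)
lemma cavOcc_eq (list_possible visited : List Int) :
    (PySem.List.pyRange 0 (PySem.List.len list_possible) 1).foldl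
      (fun acc i => acc ++ [((PySem.List.count visited (PySem.List.pyGetD list_possible i 0) : Int))]) []
    = list_possible.map (cavCnt visited) := by
  rw [PySem.List.foldl_pyRange_zero_pyGetD list_possible 0
        (fun acc x => acc ++ [((PySem.List.count visited x : Int))]) []]
  rw [PySem.List.foldl_append_singleton_eq_map (fun x => ((PySem.List.count visited x : Int)))]
  simp [cavCnt]

-- A's Prop-valued append-if loop as a filter (Bool twin is PySem.List.foldl_append_if_eq_filter,
-- which does not match the Prop ite the port elaborates to)
lemma cavFoldl_append_if (mv : Int) (f : Int → Int) :
    ∀ (l : List Int) (init : List Int),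
      l.foldl (fun acc x => if f x = mv then acc ++ [x] else acc) init
        = init ++ l.filter (fun x => f x = mv) := by
  intro l
  induction l with
  | nil => intro init; simp
  | cons x t ih =>
    intro init
    rw [List.foldl_cons, List.filter_cons]
    by_cases hx : f x = mv
    · rw [if_pos hx, ih (init ++ [x])]
      simp [hx]
    · rw [if_neg hx, ih init]
      simp [hx]

-- A's selection loop, rewritten as a filter of list_possible
lemma cavSel_eq (list_possible visited : List Int) (mv : Int) :
    (PySem.List.pyRange 0 (PySem.List.len (list_possible.map (cavCnt visited))) 1).foldl
      (fun selected k =>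
        if PySem.List.pyGetD (list_possible.map (cavCnt visited)) k 0 = mv
        then selected ++ [PySem.List.pyGetD list_possible k 0]
        else selected) []
    = list_possible.filter (fun s => cavCnt visited s = mv) := by
  have hlen : PySem.List.len (list_possible.map (cavCnt visited)) = PySem.List.len list_possible := by
    simp [PySem.List.len]
  rw [hlen]
  have hcong :
      (PySem.List.pyRange 0 (PySem.List.len list_possible) 1).foldl
        (fun selected k =>
          if PySem.List.pyGetD (list_possible.map (cavCnt visited)) k 0 = mv
          then selected ++ [PySem.List.pyGetD list_possible k 0]
          else selected) []
      = (PySem.List.pyRange 0 (PySem.List.len list_possible) 1).foldl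
        (fun selected k =>
          if cavCnt visited (PySem.List.pyGetD list_possible k 0) = mv
          then selected ++ [PySem.List.pyGetD list_possible k 0]
          else selected) [] := by
    apply PySem.List.foldl_congr_mem
    intro acc k hk
    have hk' := (PySem.List.mem_pyRange_one).1 hk
    have h0 : (0 : Int) ≤ k := hk'.1
    have h1 : k < (list_possible.length : Int) := by
      simpa [PySem.List.len] using hk'.2
    have h1' : k < ((list_possible.map (cavCnt visited)).length : Int) := by
      simpa using h1
    rw [PySem.List.pyGetD_eq_getElem _ _ h0 h1', PySem.List.pyGetD_eq_getElem _ _ h0 h1]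
    simp
  rw [hcong]
  rw [PySem.List.foldl_pyRange_zero_pyGetD list_possible 0
        (fun selected s => if cavCnt visited s = mv then selected ++ [s] else selected) []]
  rw [cavFoldl_append_if mv (cavCnt visited) list_possible []]
  simp

-- min(occurence) for a nonempty list is the running minimum of the counts
lemma cavMin_eq (x : Int) (t : List Int) (visited : List Int) :
    ((PySem.List.min? ((x :: t).map (cavCnt visited)) (fun y => y)).getD 0)
      = cavRunMin (cavCnt visited) (cavCnt visited x) t := by
  rw [List.map_cons, PySem.List.min?_id_cons]
  rw [Option.getD_some]
  rw [List.foldl_map]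
  rfl

-- ===== VERDICT (by name: the statement is the Claim_ definition above) =====
theorem choice_already_visited_spec : Claim_equal_choice_already_visited := by
  intro list_possible visited _
  unfold Spec_choice_already_visited
  cases list_possible with
  | nil => rfl
  | cons x t =>
    show choice_already_visited (x :: t) visited = _
    unfold choice_already_visited
    simp only [cavOcc_eq (x :: t) visited]
    rw [cavMin_eq x t visited]
    rw [cavSel_eq (x :: t) visited (cavRunMin (cavCnt visited) (cavCnt visited x) t)]
    rw [cavAlt_eq_filter x t visited]
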